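-- pv_equiv track=rewrite | github.com/kanatakayasu/apriori-window | paper/G-sequential-dense/implementation/python/sequential_dense.py | build_item_occurrence_map
-- ===== SOURCE A (Python) =====
-- from typing import Dict, List, Optional, Sequence, Tuple
--
-- def build_item_occurrence_map(
--     transactions: List[List[int]],
-- ) -> Dict[int, List[int]]:
--     """
--     各アイテムの出現トランザクション ID リスト（ソート済み・一意）を構築する。
--     """
--     item_map: Dict[int, List[int]] = {}
--     for t_id, items in enumerate(transactions):
--         seen: set = set()
--         for item in items:
--             if item not in seen:
--                 seen.add(item)
--                 item_map.setdefault(item, []).append(t_id)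
--     return item_map
-- ===== SOURCE B (Python) =====
-- def build_item_occurrence_map(transactions):
--     # One pass collecting a set of transaction ids per item (the set dedups,
--     # no per-transaction 'seen' set), then a final pass sorting each set.
--     item_map = {}
--     for t_id, items in enumerate(transactions):
--         for item in items:
--             item_map.setdefault(item, set()).add(t_id)
--     return {item: sorted(ids) for item, ids in item_map.items()}
-- ===== Notes on version B (the rewrite author's own statement) =====
-- stated objective: simpler
-- what changed: B drops the per-transaction 'seen' set and its membership branch, instead accumulating a set of transaction ids per item in one pass and sorting each set in a final comprehension pass.
import Mathlib
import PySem

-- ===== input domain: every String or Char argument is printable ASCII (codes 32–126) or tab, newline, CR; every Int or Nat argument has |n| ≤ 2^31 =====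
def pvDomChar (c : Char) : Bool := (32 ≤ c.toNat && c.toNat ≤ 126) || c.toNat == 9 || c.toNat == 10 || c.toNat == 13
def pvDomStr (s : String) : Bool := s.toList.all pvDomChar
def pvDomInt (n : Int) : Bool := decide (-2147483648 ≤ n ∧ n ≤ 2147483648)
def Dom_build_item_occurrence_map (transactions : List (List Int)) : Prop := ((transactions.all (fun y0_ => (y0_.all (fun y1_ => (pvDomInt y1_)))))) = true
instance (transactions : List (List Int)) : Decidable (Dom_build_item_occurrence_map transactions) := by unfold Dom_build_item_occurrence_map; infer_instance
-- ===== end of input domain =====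

-- B drops A's per-transaction 'seen' set and its membership branch, accumulating a set of
-- transaction ids per item in one pass and sorting each set in a final pass (simpler).

-- ===== PORT A =====
-- inner-loop body of A: state = (seen, item_map); setdefault(item, []).append(t_id)
def pvStepA (t : Int) (st : PySem.Set Int × PySem.Dict Int (List Int)) (item : Int) :
    PySem.Set Int × PySem.Dict Int (List Int) :=
  if PySem.Set.contains st.1 item then st
  else (PySem.Set.add st.1 item, st.2.insert item (st.2.getD item [] ++ [t]))

def build_item_occurrence_map (transactions : List (List Int)) : List (Int × List Int) :=
  ((PySem.List.enumerate transactions 0).foldl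
      (fun item_map p => (p.2.foldl (pvStepA p.1) (PySem.Set.empty, item_map)).2)
      PySem.Dict.empty).items

-- ===== PORT B =====
-- inner-loop body of B: item_map.setdefault(item, set()).add(t_id)
def pvStepB (t : Int) (m : PySem.Dict Int (PySem.Set Int)) (item : Int) :
    PySem.Dict Int (PySem.Set Int) :=
  m.insert item (PySem.Set.add (m.getD item PySem.Set.empty) t)

def build_item_occurrence_map_alt (transactions : List (List Int)) : List (Int × List Int) :=
  (((PySem.List.enumerate transactions 0).foldl
      (fun m p => p.2.foldl (pvStepB p.1) m)
      PySem.Dict.empty).items).map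
    (fun kv => (kv.1, PySem.List.sorted kv.2 (fun x => x) false))

-- ===== PRECONDITION & SPEC =====
def Spec_build_item_occurrence_map (transactions : List (List Int)) (out : List (Int × List Int)) : Prop := out = build_item_occurrence_map_alt transactions
instance (transactions : List (List Int)) (out : List (Int × List Int)) : Decidable (Spec_build_item_occurrence_map transactions out) := by unfold Spec_build_item_occurrence_map; infer_instance

-- ===== CLAIM (what is proved, stated in full; the proofs are below) =====
def Claim_equal_build_item_occurrence_map : Prop := ∀ (transactions : List (List Int)), Dom_build_item_occurrence_map transactions → Spec_build_item_occurrence_map transactions (build_item_occurrence_map transactions)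

-- ===== LEMMAS AND PROOFS =====

-- invariant between transactions: keys unique, every stored id-list strictly increasing and < next id
def pvInvQ (d : PySem.Dict Int (List Int)) (t : Int) : Prop :=
  d.keys.Nodup ∧ ∀ k v, d.get? k = some v → v.Pairwise (· < ·) ∧ ∀ x ∈ v, x < t

-- invariant inside transaction t: id t sits in a list iff its key was seen in this transaction
def pvInvP (d : PySem.Dict Int (List Int)) (t : Int) (seen : PySem.Set Int) : Prop :=
  d.keys.Nodup ∧ (∀ k, k ∈ seen → d.contains k = true) ∧
  ∀ k v, d.get? k = some v → v.Pairwise (· < ·) ∧ (∀ x ∈ v, x ≤ t) ∧ (t ∈ v ↔ k ∈ seen)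

theorem pv_insert_self (d : PySem.Dict Int (List Int)) (k : Int) (v : List Int)
    (hn : d.keys.Nodup) (h : d.get? k = some v) : d.insert k v = d := by
  apply PySem.Dict.ext
  have hc : d.contains k = true := by
    rw [PySem.Dict.contains_eq_isSome_get?, h]; rfl
  rw [PySem.Dict.items_insert_of_contains d v hc]
  have : ∀ p ∈ d.items, (if p.1 == k then (k, v) else p) = p := by
    intro p hp
    by_cases hpk : p.1 = k
    · have h2 := PySem.Dict.get?_of_mem_items (d := d) (k := p.1) (v := p.2) (by simpa using hp) hn
      rw [hpk, h] at h2
      have hv2 : v = p.2 := Option.some_inj.mp h2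
      rw [if_pos (beq_iff_eq.mpr hpk)]
      exact Prod.ext hpk.symm hv2
    · simp [hpk]
  rw [List.map_congr_left this]
  simp

theorem pv_step (t item : Int) (seen : PySem.Set Int) (d : PySem.Dict Int (List Int))
    (h : pvInvP d t seen) :
    (pvStepA t (seen, d) item).2 = pvStepB t d item ∧
    pvInvP (pvStepB t d item) t (pvStepA t (seen, d) item).1 := by
  obtain ⟨hnd, hseen, hval⟩ := h
  by_cases hc : item ∈ seen
  · -- seen: A unchanged; B's set-add and insert are no-ops
    have hcontains : d.contains item = true := hseen item hc
    obtain ⟨v, hv⟩ : ∃ v, d.get? item = some v := by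
      rw [PySem.Dict.contains_eq_isSome_get?] at hcontains
      exact Option.isSome_iff_exists.mp hcontains
    have htv : t ∈ v := (hval item v hv).2.2.mpr hc
    have hgd : d.getD item PySem.Set.empty = v := PySem.Dict.getD_of_get?_eq_some d PySem.Set.empty hv
    have hB : pvStepB t d item = d := by
      unfold pvStepB
      rw [hgd, PySem.Set.add_of_mem htv]
      exact pv_insert_self d item v hnd hv
    have hA : pvStepA t (seen, d) item = (seen, d) := by
      simp [pvStepA, hc]
    rw [hA, hB]
    exact ⟨rfl, hnd, hseen, hval⟩
  · -- unseen: both insert the same extended list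
    have hA : pvStepA t (seen, d) item
        = (PySem.Set.add seen item, d.insert item (d.getD item [] ++ [t])) := by
      simp [pvStepA, hc]
    have htnot : t ∉ d.getD item ([] : List Int) := by
      cases hgi : d.get? item with
      | none => rw [PySem.Dict.getD_of_get?_eq_none d [] hgi]; simp
      | some v =>
        rw [PySem.Dict.getD_of_get?_eq_some d [] hgi]
        intro htv
        exact hc ((hval item v hgi).2.2.mp htv)
    have hB : pvStepB t d item = d.insert item (d.getD item [] ++ [t]) := by
      unfold pvStepB
      rw [show (PySem.Set.empty : PySem.Set Int) = ([] : List Int) from rfl,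
        PySem.Set.add_of_not_mem htnot]
    refine ⟨by rw [hA, hB], ?_⟩
    rw [hB, hA]
    refine ⟨PySem.Dict.nodup_keys_insert _ _ _ hnd, ?_, ?_⟩
    · intro k hk
      rw [PySem.Dict.contains_insert]
      rcases (PySem.Set.mem_add seen item k).mp hk with hk' | hk'
      · simp [hseen k hk']
      · simp [hk']
    · intro k v hkv
      rw [PySem.Dict.get?_insert] at hkv
      by_cases hk : k = item
      · rw [if_pos hk] at hkv
        obtain rfl : d.getD item ([] : List Int) ++ [t] = v := Option.some_inj.mp hkv
        have hle : ∀ x ∈ d.getD item ([] : List Int), x ≤ t := by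
          cases hgi : d.get? item with
          | none => rw [PySem.Dict.getD_of_get?_eq_none d [] hgi]; simp
          | some w =>
            rw [PySem.Dict.getD_of_get?_eq_some d [] hgi]
            exact (hval item w hgi).2.1
        have hlt : ∀ x ∈ d.getD item ([] : List Int), x < t := by
          intro x hx
          exact lt_of_le_of_ne (hle x hx) (fun he => htnot (he ▸ hx))
        have hpw : (d.getD item ([] : List Int)).Pairwise (· < ·) := by
          cases hgi : d.get? item with
          | none => rw [PySem.Dict.getD_of_get?_eq_none d [] hgi]; simp
          | some w =>
            rw [PySem.Dict.getD_of_get?_eq_some d [] hgi]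
            exact (hval item w hgi).1
        refine ⟨?_, ?_, ?_⟩
        · rw [List.pairwise_append]
          exact ⟨hpw, List.pairwise_singleton _ _, by
            intro a ha b hb; rw [List.mem_singleton] at hb; exact hb ▸ hlt a ha⟩
        · intro x hx
          rcases List.mem_append.mp hx with hx' | hx'
          · exact hle x hx'
          · rw [List.mem_singleton] at hx'; omega
        · constructor
          · intro _
            exact hk ▸ (PySem.Set.mem_add seen item item).mpr (Or.inr rfl)
          · intro _
            exact List.mem_append.mpr (Or.inr (List.mem_singleton.mpr rfl))
      · rw [if_neg hk] at hkv
        obtain ⟨hp, hle, hiff⟩ := hval k v hkv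
        refine ⟨hp, hle, ?_⟩
        rw [hiff]
        constructor
        · intro hx
          exact (PySem.Set.mem_add seen item k).mpr (Or.inl hx)
        · intro hx
          rcases (PySem.Set.mem_add seen item k).mp hx with hx' | hx'
          · exact hx'
          · exact absurd hx' hk

theorem pv_inner (items : List Int) (t : Int) (seen : PySem.Set Int)
    (d : PySem.Dict Int (List Int)) (h : pvInvP d t seen) :
    (items.foldl (pvStepA t) (seen, d)).2 = items.foldl (pvStepB t) d ∧
    pvInvP (items.foldl (pvStepB t) d) t (items.foldl (pvStepA t) (seen, d)).1 := by
  induction items generalizing seen d with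
  | nil => exact ⟨rfl, h⟩
  | cons item rest ih =>
    obtain ⟨hstep, hinv⟩ := pv_step t item seen d h
    have := ih (pvStepA t (seen, d) item).1 (pvStepB t d item) hinv
    simp only [List.foldl_cons]
    rw [show pvStepA t (seen, d) item = ((pvStepA t (seen, d) item).1, pvStepB t d item) from
      Prod.ext rfl hstep]
    exact this

theorem pv_outer (ts : List (List Int)) (s : Int) (d : PySem.Dict Int (List Int))
    (hQ : pvInvQ d s) :
    (PySem.List.enumerate ts s).foldl
        (fun item_map p => (p.2.foldl (pvStepA p.1) (PySem.Set.empty, item_map)).2) d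
      = (PySem.List.enumerate ts s).foldl (fun m p => p.2.foldl (pvStepB p.1) m) d ∧
    pvInvQ ((PySem.List.enumerate ts s).foldl (fun m p => p.2.foldl (pvStepB p.1) m) d)
      (s + ts.length) := by
  induction ts generalizing s d with
  | nil => simpa [PySem.List.enumerate_nil] using hQ
  | cons items rest ih =>
    obtain ⟨hnd, hval⟩ := hQ
    have hP : pvInvP d s PySem.Set.empty := by
      refine ⟨hnd, by simp [PySem.Set.empty], ?_⟩
      intro k v hkv
      obtain ⟨hp, hlt⟩ := hval k v hkv
      refine ⟨hp, fun x hx => le_of_lt (hlt x hx), ?_⟩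
      simp only [PySem.Set.empty, List.not_mem_nil, iff_false]
      intro hs
      exact absurd (hlt s hs) (lt_irrefl s)
    obtain ⟨hstep, hinv⟩ := pv_inner items s PySem.Set.empty d hP
    have hQ' : pvInvQ (items.foldl (pvStepB s) d) (s + 1) := by
      obtain ⟨hnd', _, hval'⟩ := hinv
      refine ⟨hnd', ?_⟩
      intro k v hkv
      obtain ⟨hp, hle, _⟩ := hval' k v hkv
      exact ⟨hp, fun x hx => by have := hle x hx; omega⟩
    have := ih (s + 1) (items.foldl (pvStepB s) d) hQ'
    rw [PySem.List.enumerate_cons]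
    simp only [List.foldl_cons]
    rw [hstep]
    refine ⟨this.1, ?_⟩
    have := this.2
    have harith : s + 1 + (rest.length : Int) = s + (items :: rest).length := by
      simp; omega
    rwa [harith] at this

-- ===== VERDICT (by name: the statement is the Claim_ definition above) =====
theorem build_item_occurrence_map_spec : Claim_equal_build_item_occurrence_map := by
  intro ts _
  unfold Spec_build_item_occurrence_map build_item_occurrence_map build_item_occurrence_map_alt
  obtain ⟨heq, hnd, hval⟩ := pv_outer ts 0 PySem.Dict.empty
    ⟨by simp [PySem.Dict.keys_empty], by intro k v hkv; rw [PySem.Dict.get?_empty] at hkv; cases hkv⟩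
  rw [heq]
  set dF := (PySem.List.enumerate ts 0).foldl (fun m p => p.2.foldl (pvStepB p.1) m)
    PySem.Dict.empty with hdF
  have : ∀ kv ∈ dF.items, (kv.1, PySem.List.sorted kv.2 (fun x => x) false) = kv := by
    intro kv hkv
    have hget := PySem.Dict.get?_of_mem_items (d := dF) (k := kv.1) (v := kv.2)
      (by simpa using hkv) hnd
    have hp : kv.2.Pairwise (· < ·) := (hval kv.1 kv.2 hget).1
    rw [PySem.List.sorted_eq_self_of_pairwise kv.2 (fun x => x) (hp.imp (fun h => le_of_lt h))]
  rw [List.map_congr_left this]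
  simp
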